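-- pv_equiv track=rewrite | github.com/paiml/depyler | examples/hard_sec_key_derivation.py | derive_multiple_flat
-- ===== SOURCE A (Python) =====
-- from typing import List, Tuple
--
-- def derive_multiple_flat(master: List[int], salt: List[int], count: int, kl: int) -> List[int]:
--     keys: List[int] = []
--     for idx in range(count):
--         h: List[int] = [0] * 8
--         combined: List[int] = []
--         for s in salt:
--             combined.append(s)
--         for m in master:
--             combined.append(m)
--         combined.append(idx & 0xFF)
--         for j in range(len(combined)):
--             pos: int = j % 8
--             h[pos] = ((h[pos] * 37 + combined[j]) ^ h[(pos + 3) % 8]) & 0xFF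
--         for j in range(kl):
--             keys.append(h[j % 8])
--     return keys
-- ===== SOURCE B (Python) =====
-- from typing import List
--
-- def derive_multiple_flat(master: List[int], salt: List[int], count: int, kl: int) -> List[int]:
--     # Hash the shared salt+master prefix ONCE; each idx only applies the final byte.
--     prefix: List[int] = salt + master
--     n: int = len(prefix)
--     h0: List[int] = [0] * 8
--     for j in range(n):
--         pos = j % 8
--         h0[pos] = ((h0[pos] * 37 + prefix[j]) ^ h0[(pos + 3) % 8]) & 0xFF
--     tail_pos = n % 8
--     xp = (tail_pos + 3) % 8
--     keys: List[int] = []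
--     for idx in range(count):
--         h = list(h0)
--         h[tail_pos] = ((h0[tail_pos] * 37 + (idx & 0xFF)) ^ h0[xp]) & 0xFF
--         for j in range(kl):
--             keys.append(h[j % 8])
--     return keys
-- ===== Notes on version B (the rewrite author's own statement) =====
-- stated objective: faster
-- what changed: B hashes the shared salt+master prefix once outside the loop and per index applies only the single final-byte hash step, instead of rebuilding and rehashing the whole combined buffer for every index.
import Mathlib
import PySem

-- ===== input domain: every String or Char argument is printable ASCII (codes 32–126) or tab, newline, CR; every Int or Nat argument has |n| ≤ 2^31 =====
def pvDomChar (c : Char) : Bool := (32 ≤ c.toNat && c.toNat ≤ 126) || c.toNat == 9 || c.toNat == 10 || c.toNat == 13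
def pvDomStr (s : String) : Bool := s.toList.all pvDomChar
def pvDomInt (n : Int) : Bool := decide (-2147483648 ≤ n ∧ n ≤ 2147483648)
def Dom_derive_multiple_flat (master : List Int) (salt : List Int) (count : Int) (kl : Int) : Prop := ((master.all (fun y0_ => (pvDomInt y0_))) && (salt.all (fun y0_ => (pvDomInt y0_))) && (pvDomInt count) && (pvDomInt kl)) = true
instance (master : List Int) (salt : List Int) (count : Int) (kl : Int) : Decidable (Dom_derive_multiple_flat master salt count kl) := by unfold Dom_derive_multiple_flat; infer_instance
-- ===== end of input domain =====

-- B hoists the hash of the shared salt+master prefix out of the per-index loop (one final-byte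
-- step per index instead of rehashing everything); proved to return exactly A's value.


-- one update of the 8-byte rolling state: h[pos] = ((h[pos]*37 + c) ^ h[(pos+3)%8]) & 0xFF
def hashStep (h : List Int) (j : Nat) (c : Int) : List Int :=
  let pos := j % 8
  h.set pos (PySem.Int.band (PySem.Int.bxor (h.getD pos 0 * 37 + c) (h.getD ((pos + 3) % 8) 0)) 255)

-- ===== PORT A =====
def derive_multiple_flat (master : List Int) (salt : List Int) (count : Int) (kl : Int) : List Int :=
  (List.range count.toNat).foldl (fun keys idx =>
    let combined : List Int := salt ++ master ++ [PySem.Int.band (idx : Int) 255]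
    let h : List Int :=
      (List.range combined.length).foldl (fun h j => hashStep h j (combined.getD j 0))
        (List.replicate 8 0)
    keys ++ (List.range kl.toNat).map (fun j => h.getD (j % 8) 0)) []

-- ===== PORT B =====
def derive_multiple_flat_alt (master : List Int) (salt : List Int) (count : Int) (kl : Int) : List Int :=
  let pre : List Int := salt ++ master
  let n : Nat := pre.length
  let h0 : List Int :=
    (List.range n).foldl (fun h j => hashStep h j (pre.getD j 0)) (List.replicate 8 0)
  (List.range count.toNat).foldl (fun keys idx =>
    let h : List Int := hashStep h0 n (PySem.Int.band (idx : Int) 255)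
    keys ++ (List.range kl.toNat).map (fun j => h.getD (j % 8) 0)) []

-- ===== PRECONDITION & SPEC =====
def Spec_derive_multiple_flat (master : List Int) (salt : List Int) (count : Int) (kl : Int) (out : List Int) : Prop := out = derive_multiple_flat_alt master salt count kl
instance (master : List Int) (salt : List Int) (count : Int) (kl : Int) (out : List Int) : Decidable (Spec_derive_multiple_flat master salt count kl out) := by unfold Spec_derive_multiple_flat; infer_instance

-- ===== CLAIM (what is proved, stated in full; the proofs are below) =====
def Claim_equal_derive_multiple_flat : Prop := ∀ (master : List Int) (salt : List Int) (count : Int) (kl : Int), Dom_derive_multiple_flat master salt count kl → Spec_derive_multiple_flat master salt count kl (derive_multiple_flat master salt count kl)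

-- ===== LEMMAS AND PROOFS =====

-- hashing prefix ++ [b] = hashing the prefix, then one step with index (length of prefix)
lemma innerFold_append (pre : List Int) (b : Int) (init : List Int) :
    (List.range (pre ++ [b]).length).foldl
        (fun h j => hashStep h j ((pre ++ [b]).getD j 0)) init
    = hashStep
        ((List.range pre.length).foldl (fun h j => hashStep h j (pre.getD j 0)) init)
        pre.length b := by
  have hlen : (pre ++ [b]).length = pre.length + 1 := by simp
  rw [hlen, List.range_succ, List.foldl_append]
  have hb : (pre ++ [b]).getD pre.length 0 = b := by
    simp [List.getD]
  have hcong : (List.range pre.length).foldl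
      (fun h j => hashStep h j ((pre ++ [b]).getD j 0)) init
      = (List.range pre.length).foldl (fun h j => hashStep h j (pre.getD j 0)) init := by
    apply List.foldl_ext
    intro h j hj
    have hjlt : j < pre.length := List.mem_range.mp hj
    rw [List.getD_append _ _ _ _ hjlt]
  simp only [List.foldl_cons, List.foldl_nil, hb, hcong]

-- ===== VERDICT (by name: the statement is the Claim_ definition above) =====
theorem derive_multiple_flat_spec : Claim_equal_derive_multiple_flat := by
  intro master salt count kl _
  unfold Spec_derive_multiple_flat derive_multiple_flat derive_multiple_flat_alt
  apply List.foldl_ext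
  intro keys idx _
  simp only [innerFold_append]
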